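-- pv_equiv track=rewrite | github.com/rzumls/minesweeper-ai | AI.py | are_consecutive
-- ===== SOURCE A (Python) =====
-- def are_consecutive(groups):
--     groups = sorted(groups)
--
--     if all(
--         groups[i][0] == groups[0][0] and
--         groups[i][1] == groups[0][1] + i
--         for i in range(len(groups))
--     ):
--         return True
--
--     if all(groups[i][1] == groups[0][1] and
--            groups[i][0] == groups[0][0] + i
--            for i in range(len(groups))
--     ):
--         return True
--
--     return False
-- ===== SOURCE B (Python) =====
-- def are_consecutive(groups):
--     groups = list(groups)
--     if not groups:
--         return True
--     n = len(groups)
--     rows = {g[0] for g in groups}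
--     cols = {g[1] for g in groups}
--     return (len(rows) == 1 and len(cols) == n and max(cols) - min(cols) == n - 1) or \
--            (len(cols) == 1 and len(rows) == n and max(rows) - min(rows) == n - 1)
-- ===== Notes on version B (the rewrite author's own statement) =====
-- stated objective: alternative
-- what changed: Replaced sort-then-index-scan with an order-free check: one axis constant (one distinct value), the other axis all-distinct with span n-1, using sets and min/max instead of sorting.
import Mathlib
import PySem

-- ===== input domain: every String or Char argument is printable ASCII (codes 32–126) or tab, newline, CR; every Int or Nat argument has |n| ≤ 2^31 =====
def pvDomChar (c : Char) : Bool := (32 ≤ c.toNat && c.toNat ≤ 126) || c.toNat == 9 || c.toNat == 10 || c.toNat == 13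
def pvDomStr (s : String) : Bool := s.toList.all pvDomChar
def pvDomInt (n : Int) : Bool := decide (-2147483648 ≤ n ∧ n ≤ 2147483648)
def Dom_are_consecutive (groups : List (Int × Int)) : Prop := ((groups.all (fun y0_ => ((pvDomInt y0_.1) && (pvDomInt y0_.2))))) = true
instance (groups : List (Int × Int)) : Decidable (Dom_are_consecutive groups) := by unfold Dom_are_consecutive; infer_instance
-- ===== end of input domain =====

-- B replaces A's sort-then-scan by an order-free set-based check (one axis constant, the
-- other axis all-distinct with span n-1); proved to return the same Bool on every input.


-- ===== PORT A =====
-- first 'all' of A: groups[i][0] == groups[0][0] and groups[i][1] == groups[0][1] + i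
def pvCheckRow (g : List (Int × Int)) : Bool :=
  (PySem.List.pyRange 0 (g.length : Int) 1).all fun i =>
    ((PySem.List.pyGetD g i (0, 0)).1 == (PySem.List.pyGetD g 0 (0, 0)).1) &&
    ((PySem.List.pyGetD g i (0, 0)).2 == (PySem.List.pyGetD g 0 (0, 0)).2 + i)

-- second 'all' of A: groups[i][1] == groups[0][1] and groups[i][0] == groups[0][0] + i
def pvCheckCol (g : List (Int × Int)) : Bool :=
  (PySem.List.pyRange 0 (g.length : Int) 1).all fun i =>
    ((PySem.List.pyGetD g i (0, 0)).2 == (PySem.List.pyGetD g 0 (0, 0)).2) &&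
    ((PySem.List.pyGetD g i (0, 0)).1 == (PySem.List.pyGetD g 0 (0, 0)).1 + i)

def are_consecutive (groups : List (Int × Int)) : Bool :=
  let g := PySem.List.sorted2 groups (fun p => p.1) (fun p => p.2)  -- sorted(groups): lexicographic
  if pvCheckRow g then true
  else if pvCheckCol g then true
  else false

-- ===== PORT B =====
def are_consecutive_alt (groups : List (Int × Int)) : Bool :=
  if groups = [] then true
  else
    let n := groups.length
    let rows := PySem.Set.ofList (groups.map (fun g => g.1))
    let cols := PySem.Set.ofList (groups.map (fun g => g.2))
    ((rows.length == 1) && (cols.length == n) &&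
      ((PySem.List.max? cols (fun x => x)).getD 0 - (PySem.List.min? cols (fun x => x)).getD 0
        == (n : Int) - 1)) ||
    ((cols.length == 1) && (rows.length == n) &&
      ((PySem.List.max? rows (fun x => x)).getD 0 - (PySem.List.min? rows (fun x => x)).getD 0
        == (n : Int) - 1))

-- ===== PRECONDITION & SPEC =====
def Spec_are_consecutive (groups : List (Int × Int)) (out : Bool) : Prop := out = are_consecutive_alt groups
instance (groups : List (Int × Int)) (out : Bool) : Decidable (Spec_are_consecutive groups out) := by unfold Spec_are_consecutive; infer_instance

-- ===== CLAIM (what is proved, stated in full; the proofs are below) =====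
def Claim_equal_are_consecutive : Prop := ∀ (groups : List (Int × Int)), Dom_are_consecutive groups → Spec_are_consecutive groups (are_consecutive groups)

-- ===== LEMMAS AND PROOFS =====
-- a "row ramp": constant first coordinate, consecutive second coordinates
def pvRamp (r c : Int) (n : Nat) : List (Int × Int) :=
  (List.range n).map (fun (i : Nat) => (r, c + (i : Int)))
-- a "column ramp": consecutive first coordinates, constant second coordinate
def pvRampT (r c : Int) (n : Nat) : List (Int × Int) :=
  (List.range n).map (fun (i : Nat) => (r + (i : Int), c))

theorem sorted2_eq_sorted_lex (xs : List (Int × Int)) :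
    PySem.List.sorted2 xs (fun p => p.1) (fun p => p.2) =
    PySem.List.sorted xs (fun p => toLex (p.1, p.2)) := by
  have hcmp : (fun (a b : Int × Int) => decide (a.1 < b.1) || (!decide (b.1 < a.1) && decide (a.2 < b.2)))
      = (fun (a b : Int × Int) => decide ((toLex (a.1, a.2) : Lex (Int × Int)) < toLex (b.1, b.2))) := by
    funext a b
    rw [Bool.eq_iff_iff]
    simp only [Bool.or_eq_true, Bool.and_eq_true, Bool.not_eq_eq_eq_not,
      Bool.not_true, decide_eq_false_iff_not, decide_eq_true_eq, Prod.Lex.lt_iff, ofLex_toLex]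
    constructor
    · rintro (h | ⟨h1, h2⟩)
      · exact Or.inl h
      · rcases lt_trichotomy a.1 b.1 with h' | h' | h'
        · exact Or.inl h'
        · exact Or.inr ⟨h', h2⟩
        · exact absurd h' h1
    · rintro (h | ⟨h1, h2⟩)
      · exact Or.inl h
      · exact Or.inr ⟨by omega, h2⟩
  simp only [PySem.List.sorted2, PySem.List.sorted]
  rw [hcmp]
  simp only [Bool.false_eq_true, if_false]
theorem checkRow_eval (g : List (Int × Int)) :
    pvCheckRow g = true ↔ ∀ k : Nat, k < g.length →
      (g.getD k (0, 0)).1 = (g.getD 0 (0, 0)).1 ∧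
      (g.getD k (0, 0)).2 = (g.getD 0 (0, 0)).2 + k := by
  unfold pvCheckRow
  rw [PySem.List.pyRange_one]
  simp only [List.all_map, List.all_eq_true, List.mem_range, zero_add, Int.sub_zero,
    Int.toNat_natCast, Bool.and_eq_true, beq_iff_eq, Function.comp_apply,
    PySem.List.pyGetD_natCast, PySem.List.pyGetD_ofNat']
theorem checkCol_eval (g : List (Int × Int)) :
    pvCheckCol g = true ↔ ∀ k : Nat, k < g.length →
      (g.getD k (0, 0)).2 = (g.getD 0 (0, 0)).2 ∧
      (g.getD k (0, 0)).1 = (g.getD 0 (0, 0)).1 + k := by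
  unfold pvCheckCol
  rw [PySem.List.pyRange_one]
  simp only [List.all_map, List.all_eq_true, List.mem_range, zero_add, Int.sub_zero,
    Int.toNat_natCast, Bool.and_eq_true, beq_iff_eq, Function.comp_apply,
    PySem.List.pyGetD_natCast, PySem.List.pyGetD_ofNat']
theorem ramp_pairwise (r c : Int) (n : Nat) :
    (pvRamp r c n).Pairwise (fun a b =>
      (fun p : Int × Int => (toLex (p.1, p.2) : Lex (Int × Int))) a <
      (fun p : Int × Int => (toLex (p.1, p.2) : Lex (Int × Int))) b) := by
  rw [List.pairwise_iff_getElem]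
  intro i j hi hj hij
  simp only [pvRamp, List.length_map, List.length_range] at hi hj
  simp only [pvRamp, List.getElem_map, List.getElem_range, Prod.Lex.lt_iff, ofLex_toLex]
  right
  exact ⟨trivial, by omega⟩
theorem rampT_pairwise (r c : Int) (n : Nat) :
    (pvRampT r c n).Pairwise (fun a b =>
      (fun p : Int × Int => (toLex (p.1, p.2) : Lex (Int × Int))) a <
      (fun p : Int × Int => (toLex (p.1, p.2) : Lex (Int × Int))) b) := by
  rw [List.pairwise_iff_getElem]
  intro i j hi hj hij
  simp only [pvRampT, List.length_map, List.length_range] at hi hj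
  simp only [pvRampT, List.getElem_map, List.getElem_range, Prod.Lex.lt_iff, ofLex_toLex]
  left
  omega
theorem checkRow_iff_perm (groups : List (Int × Int)) :
    pvCheckRow (PySem.List.sorted2 groups (fun p => p.1) (fun p => p.2)) = true ↔
    ∃ r c, groups.Perm (pvRamp r c groups.length) := by
  have hperm : (PySem.List.sorted2 groups (fun p => p.1) (fun p => p.2)).Perm groups :=
    PySem.List.sorted2_perm groups _ _ false
  have hlen : (PySem.List.sorted2 groups (fun p => p.1) (fun p => p.2)).length = groups.length :=
    hperm.length_eq
  set g := PySem.List.sorted2 groups (fun p => p.1) (fun p => p.2) with hgdef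
  constructor
  · intro h
    refine ⟨(g.getD 0 (0, 0)).1, (g.getD 0 (0, 0)).2, ?_⟩
    have hg : g = pvRamp (g.getD 0 (0, 0)).1 (g.getD 0 (0, 0)).2 groups.length := by
      apply List.ext_getElem
      · simp [pvRamp, hlen]
      · intro i h1 h2
        have hi := (checkRow_eval g).mp h i (by omega)
        rw [List.getD_eq_getElem _ _ (by omega)] at hi
        simp only [pvRamp, List.getElem_map, List.getElem_range]
        exact Prod.ext hi.1 hi.2
    exact hg ▸ hperm.symm
  · rintro ⟨r, c, h⟩
    have hg : g = pvRamp r c groups.length := by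
      rw [hgdef, sorted2_eq_sorted_lex]
      exact PySem.List.sorted_eq_of_perm_of_pairwise_lt groups _ _ h.symm (ramp_pairwise r c _)
    apply (checkRow_eval g).mpr
    intro k hk
    have hk' : k < groups.length := by rwa [hlen] at hk
    have hlr : (pvRamp r c groups.length).length = groups.length := by
      simp [pvRamp]
    rw [hg, List.getD_eq_getElem _ _ (by omega), List.getD_eq_getElem _ _ (by omega)]
    simp [pvRamp]
theorem checkCol_iff_perm (groups : List (Int × Int)) :
    pvCheckCol (PySem.List.sorted2 groups (fun p => p.1) (fun p => p.2)) = true ↔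
    ∃ r c, groups.Perm (pvRampT r c groups.length) := by
  have hperm : (PySem.List.sorted2 groups (fun p => p.1) (fun p => p.2)).Perm groups :=
    PySem.List.sorted2_perm groups _ _ false
  have hlen : (PySem.List.sorted2 groups (fun p => p.1) (fun p => p.2)).length = groups.length :=
    hperm.length_eq
  set g := PySem.List.sorted2 groups (fun p => p.1) (fun p => p.2) with hgdef
  constructor
  · intro h
    refine ⟨(g.getD 0 (0, 0)).1, (g.getD 0 (0, 0)).2, ?_⟩
    have hg : g = pvRampT (g.getD 0 (0, 0)).1 (g.getD 0 (0, 0)).2 groups.length := by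
      apply List.ext_getElem
      · simp [pvRampT, hlen]
      · intro i h1 h2
        have hi := (checkCol_eval g).mp h i (by omega)
        rw [List.getD_eq_getElem _ _ (by omega)] at hi
        simp only [pvRampT, List.getElem_map, List.getElem_range]
        exact Prod.ext hi.2 hi.1
    exact hg ▸ hperm.symm
  · rintro ⟨r, c, h⟩
    have hg : g = pvRampT r c groups.length := by
      rw [hgdef, sorted2_eq_sorted_lex]
      exact PySem.List.sorted_eq_of_perm_of_pairwise_lt groups _ _ h.symm (rampT_pairwise r c _)
    apply (checkCol_eval g).mpr
    intro k hk
    have hk' : k < groups.length := by rwa [hlen] at hk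
    have hlr : (pvRampT r c groups.length).length = groups.length := by
      simp [pvRampT]
    rw [hg, List.getD_eq_getElem _ _ (by omega), List.getD_eq_getElem _ _ (by omega)]
    simp [pvRampT]
theorem ramp_nodup (r c : Int) (n : Nat) : (pvRamp r c n).Nodup := by
  refine List.Nodup.map ?_ List.nodup_range
  intro i j hij
  simp only [Prod.mk.injEq, add_right_inj] at hij
  exact_mod_cast hij.2

theorem mem_ramp (r c : Int) (n : Nat) (a : Int × Int) :
    a ∈ pvRamp r c n ↔ a.1 = r ∧ c ≤ a.2 ∧ a.2 < c + n := by
  simp only [pvRamp, List.mem_map, List.mem_range]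
  constructor
  · rintro ⟨i, hi, rfl⟩
    refine ⟨rfl, by omega, by omega⟩
  · rintro ⟨h1, h2, h3⟩
    refine ⟨(a.2 - c).toNat, by omega, ?_⟩
    have : c + ((a.2 - c).toNat : Int) = a.2 := by omega
    rw [this, ← h1]

theorem alt_core (l : List (Int × Int)) (hne : l ≠ []) :
    (((PySem.Set.ofList (l.map (fun g => g.1))).length == 1) &&
     ((PySem.Set.ofList (l.map (fun g => g.2))).length == l.length) &&
     ((PySem.List.max? (PySem.Set.ofList (l.map (fun g => g.2))) (fun x => x)).getD 0 -
      (PySem.List.min? (PySem.Set.ofList (l.map (fun g => g.2))) (fun x => x)).getD 0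
        == (l.length : Int) - 1)) = true ↔
    ∃ r c, l.Perm (pvRamp r c l.length) := by
  obtain ⟨p0, t0, rfl⟩ := List.exists_cons_of_ne_nil hne
  set l := p0 :: t0 with hl
  set R := PySem.Set.ofList (l.map (fun g => g.1)) with hRdef
  set C := PySem.Set.ofList (l.map (fun g => g.2)) with hCdef
  have hRn : R.Nodup := PySem.Set.nodup_ofList _
  have hCn : C.Nodup := PySem.Set.nodup_ofList _
  have hmemR : ∀ x, x ∈ R ↔ x ∈ l.map (fun g => g.1) := fun x => PySem.Set.mem_ofList _ x
  have hmemC : ∀ x, x ∈ C ↔ x ∈ l.map (fun g => g.2) := fun x => PySem.Set.mem_ofList _ x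
  have hCne : C ≠ [] := by
    intro hC
    have : p0.2 ∈ C := (hmemC _).mpr (List.mem_map.mpr ⟨p0, List.mem_cons_self, rfl⟩)
    rw [hC] at this; exact absurd this (List.not_mem_nil)
  obtain ⟨m, hm⟩ : ∃ m, PySem.List.min? C (fun x => x) = some m := by
    cases hmC : PySem.List.min? C (fun x => x) with
    | none => exact absurd ((PySem.List.min?_eq_none_iff _ _).mp hmC) hCne
    | some m => exact ⟨m, rfl⟩
  obtain ⟨M, hM⟩ : ∃ M, PySem.List.max? C (fun x => x) = some M := by
    cases hmC : PySem.List.max? C (fun x => x) with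
    | none => exact absurd ((PySem.List.max?_eq_none_iff _ _).mp hmC) hCne
    | some M => exact ⟨M, rfl⟩
  rw [hm, hM]
  simp only [Bool.and_eq_true, beq_iff_eq, Option.getD_some]
  constructor
  · rintro ⟨⟨h1, h2⟩, h3⟩
    obtain ⟨r, hR⟩ := List.length_eq_one_iff.mp h1
    have hfst : ∀ p ∈ l, p.1 = r := by
      intro p hp
      have : p.1 ∈ R := (hmemR _).mpr (List.mem_map.mpr ⟨p, hp, rfl⟩)
      rw [hR] at this; simpa using this
    -- nodup of the second projections
    have hC_toF : C.toFinset = (l.map (fun g => g.2)).toFinset := by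
      ext x; simp only [List.mem_toFinset, hmemC]
    have hcardS : (l.map (fun g => g.2)).toFinset.card = l.length := by
      rw [← hC_toF, List.toFinset_card_of_nodup hCn, h2]
    have hnodupS : (l.map (fun g => g.2)).Nodup := by
      have hdl : (l.map (fun g => g.2)).dedup.length = (l.map (fun g => g.2)).length := by
        rw [← List.card_toFinset, hcardS, List.length_map]
      have := List.Sublist.eq_of_length (List.dedup_sublist _) hdl
      exact List.dedup_eq_self.mp this
    have hnodupL : l.Nodup := List.Nodup.of_map _ hnodupS
    -- bounds
    have hmlb : ∀ x ∈ l.map (fun g => g.2), m ≤ x := by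
      intro x hx
      exact PySem.List.min?_isMin hm x ((hmemC x).mpr hx)
    have hMub : ∀ x ∈ l.map (fun g => g.2), x ≤ M := by
      intro x hx
      exact PySem.List.max?_isMax hM x ((hmemC x).mpr hx)
    -- Finset pigeonhole: the snd-projections are exactly Icc m M
    have hFeq : (l.map (fun g => g.2)).toFinset = Finset.Icc m M := by
      apply Finset.eq_of_subset_of_card_le
      · intro x hx
        rw [List.mem_toFinset] at hx
        rw [Finset.mem_Icc]
        exact ⟨hmlb x hx, hMub x hx⟩
      · rw [Int.card_Icc, hcardS]; omega
    have hmemS : ∀ x, x ∈ l.map (fun g => g.2) ↔ (m ≤ x ∧ x ≤ M) := by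
      intro x
      rw [← List.mem_toFinset, hFeq, Finset.mem_Icc]
    refine ⟨r, m, (List.perm_ext_iff_of_nodup hnodupL (ramp_nodup r m _)).mpr ?_⟩
    intro a
    rw [mem_ramp]
    constructor
    · intro ha
      have h2a : a.2 ∈ l.map (fun g => g.2) := List.mem_map.mpr ⟨a, ha, rfl⟩
      have := (hmemS a.2).mp h2a
      exact ⟨hfst a ha, this.1, by omega⟩
    · rintro ⟨ha1, ha2, ha3⟩
      have : a.2 ∈ l.map (fun g => g.2) := (hmemS a.2).mpr ⟨ha2, by omega⟩
      obtain ⟨p, hp, hpe⟩ := List.mem_map.mp this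
      have : p = a := Prod.ext (by rw [hfst p hp, ha1]) hpe
      rwa [← this]
  · rintro ⟨r, c, hpm⟩
    have hn1 : 1 ≤ l.length := by rw [hl]; simp
    -- snd projections are a permutation of the consecutive block
    have hS : (l.map (fun g => g.2)).Perm ((List.range l.length).map (fun (i : Nat) => c + (i : Int))) := by
      have := hpm.map (fun g : Int × Int => g.2)
      rwa [pvRamp, List.map_map] at this
    have hSnodup : (l.map (fun g => g.2)).Nodup := by
      rw [hS.nodup_iff]
      refine List.Nodup.map ?_ List.nodup_range
      intro i j hij
      simp only [add_right_inj] at hij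
      exact_mod_cast hij
    have hmemS : ∀ x, x ∈ l.map (fun g => g.2) ↔ (c ≤ x ∧ x < c + l.length) := by
      intro x
      rw [hS.mem_iff]
      simp only [List.mem_map, List.mem_range]
      constructor
      · rintro ⟨i, hi, rfl⟩; omega
      · rintro ⟨h1, h2⟩; exact ⟨(x - c).toNat, by omega, by omega⟩
    have hfst : ∀ p ∈ l, p.1 = r := by
      intro p hp
      have := hpm.subset hp
      rw [mem_ramp] at this
      exact this.1
    -- C is a permutation of the snd projections
    have hCperm : C.Perm (l.map (fun g => g.2)) :=
      (List.perm_ext_iff_of_nodup hCn hSnodup).mpr hmemC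
    have hClen : C.length = l.length := by rw [hCperm.length_eq, List.length_map]
    -- R is exactly [r]
    have hRr : R = [r] := by
      have hrR : r ∈ R := by
        rw [hmemR]
        refine List.mem_map.mpr ⟨p0, List.mem_cons_self, hfst p0 List.mem_cons_self⟩
      have hallR : ∀ x ∈ R, x = r := by
        intro x hx
        rw [hmemR] at hx
        obtain ⟨p, hp, rfl⟩ := List.mem_map.mp hx
        exact hfst p hp
      rcases hR0 : R with _ | ⟨a, t⟩
      · rw [hR0] at hrR; exact absurd hrR (List.not_mem_nil)
      · rcases t with _ | ⟨b, t'⟩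
        · rw [hallR a (by rw [hR0]; exact List.mem_cons_self)]
        · exfalso
          have ha : a = r := hallR a (by rw [hR0]; exact List.mem_cons_self)
          have hb : b = r := hallR b (by rw [hR0]; simp)
          rw [hR0] at hRn
          rw [List.nodup_cons] at hRn
          exact hRn.1 (by rw [ha, hb]; exact List.mem_cons_self)
    -- min and max
    have hmc : m = c := by
      have h1 : c ≤ m := by
        have : m ∈ l.map (fun g => g.2) := (hmemC m).mp (PySem.List.min?_mem hm)
        exact ((hmemS m).mp this).1
      have h2 : m ≤ c := by
        refine PySem.List.min?_isMin hm c ((hmemC c).mpr ((hmemS c).mpr ⟨le_refl c, by omega⟩))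
      omega
    have hMc : M = c + l.length - 1 := by
      have h1 : M ≤ c + l.length - 1 := by
        have : M ∈ l.map (fun g => g.2) := (hmemC M).mp (PySem.List.max?_mem hM)
        have := (hmemS M).mp this
        omega
      have h2 : c + l.length - 1 ≤ M := by
        refine PySem.List.max?_isMax hM _ ((hmemC _).mpr ((hmemS _).mpr ⟨by omega, by omega⟩))
      omega
    refine ⟨⟨by rw [hRr]; rfl, hClen⟩, by omega⟩

theorem alt_core_T (l : List (Int × Int)) (hne : l ≠ []) :
    (((PySem.Set.ofList (l.map (fun g => g.2))).length == 1) &&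
     ((PySem.Set.ofList (l.map (fun g => g.1))).length == l.length) &&
     ((PySem.List.max? (PySem.Set.ofList (l.map (fun g => g.1))) (fun x => x)).getD 0 -
      (PySem.List.min? (PySem.Set.ofList (l.map (fun g => g.1))) (fun x => x)).getD 0
        == (l.length : Int) - 1)) = true ↔
    ∃ r c, l.Perm (pvRampT r c l.length) := by
  have hswap : ∀ (m : List (Int × Int)), (m.map (fun p => (p.2, p.1))).map (fun p => (p.2, p.1)) = m := by
    intro m; simp [List.map_map, Function.comp_def]
  have hne' : l.map (fun p : Int × Int => (p.2, p.1)) ≠ [] := by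
    simpa using hne
  have h := alt_core (l.map (fun p : Int × Int => (p.2, p.1))) hne'
  have hm1 : (l.map (fun p : Int × Int => (p.2, p.1))).map (fun g => g.1) = l.map (fun g => g.2) := by
    simp [List.map_map, Function.comp_def]
  have hm2 : (l.map (fun p : Int × Int => (p.2, p.1))).map (fun g => g.2) = l.map (fun g => g.1) := by
    simp [List.map_map, Function.comp_def]
  rw [hm1, hm2, List.length_map] at h
  rw [h]
  constructor
  · rintro ⟨r, c, hp⟩
    refine ⟨c, r, ?_⟩
    have := hp.map (fun p : Int × Int => (p.2, p.1))
    rw [hswap] at this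
    have hrm : (pvRamp r c l.length).map (fun p : Int × Int => (p.2, p.1)) = pvRampT c r l.length := by
      simp [pvRamp, pvRampT, List.map_map, Function.comp_def]
    rwa [hrm] at this
  · rintro ⟨r, c, hp⟩
    refine ⟨c, r, ?_⟩
    have := hp.map (fun p : Int × Int => (p.2, p.1))
    have hrm : (pvRampT r c l.length).map (fun p : Int × Int => (p.2, p.1)) = pvRamp c r l.length := by
      simp [pvRamp, pvRampT, List.map_map, Function.comp_def]
    rwa [hrm] at this

-- ===== VERDICT (by name: the statement is the Claim_ definition above) =====
theorem are_consecutive_spec : Claim_equal_are_consecutive := by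
  intro groups _
  unfold Spec_are_consecutive
  by_cases hne : groups = []
  · subst hne; rfl
  · have h1 : pvCheckRow (PySem.List.sorted2 groups (fun p => p.1) (fun p => p.2))
        = (((PySem.Set.ofList (groups.map (fun g => g.1))).length == 1) &&
           ((PySem.Set.ofList (groups.map (fun g => g.2))).length == groups.length) &&
           ((PySem.List.max? (PySem.Set.ofList (groups.map (fun g => g.2))) (fun x => x)).getD 0 -
            (PySem.List.min? (PySem.Set.ofList (groups.map (fun g => g.2))) (fun x => x)).getD 0
              == (groups.length : Int) - 1)) :=
      Bool.eq_iff_iff.mpr (by rw [checkRow_iff_perm groups, alt_core groups hne])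
    have h2 : pvCheckCol (PySem.List.sorted2 groups (fun p => p.1) (fun p => p.2))
        = (((PySem.Set.ofList (groups.map (fun g => g.2))).length == 1) &&
           ((PySem.Set.ofList (groups.map (fun g => g.1))).length == groups.length) &&
           ((PySem.List.max? (PySem.Set.ofList (groups.map (fun g => g.1))) (fun x => x)).getD 0 -
            (PySem.List.min? (PySem.Set.ofList (groups.map (fun g => g.1))) (fun x => x)).getD 0
              == (groups.length : Int) - 1)) :=
      Bool.eq_iff_iff.mpr (by rw [checkCol_iff_perm groups, alt_core_T groups hne])
    unfold are_consecutive are_consecutive_alt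
    simp only [if_neg hne]
    rw [h1, h2]
    cases (((PySem.Set.ofList (groups.map (fun g => g.1))).length == 1) &&
           ((PySem.Set.ofList (groups.map (fun g => g.2))).length == groups.length) &&
           ((PySem.List.max? (PySem.Set.ofList (groups.map (fun g => g.2))) (fun x => x)).getD 0 -
            (PySem.List.min? (PySem.Set.ofList (groups.map (fun g => g.2))) (fun x => x)).getD 0
              == (groups.length : Int) - 1)) <;>
    cases (((PySem.Set.ofList (groups.map (fun g => g.2))).length == 1) &&
           ((PySem.Set.ofList (groups.map (fun g => g.1))).length == groups.length) &&
           ((PySem.List.max? (PySem.Set.ofList (groups.map (fun g => g.1))) (fun x => x)).getD 0 -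
            (PySem.List.min? (PySem.Set.ofList (groups.map (fun g => g.1))) (fun x => x)).getD 0
              == (groups.length : Int) - 1)) <;> rfl
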